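-- pv_equiv track=rewrite | github.com/HamedMP/collatz-fmf | explorations/explore33.py | ones_runs
-- ===== SOURCE A (Python) =====
-- def ones_runs(n):
--     """Number of maximal runs of 1s in binary."""
--     b = bin(n)[2:]
--     count = 0
--     in_run = False
--     for bit in b:
--         if bit == '1' and not in_run:
--             count += 1
--             in_run = True
--         elif bit == '0':
--             in_run = False
--     return count
-- ===== SOURCE B (Python) =====
-- def ones_runs(n):
--     """Number of maximal runs of 1s in binary."""
--     return sum(1 for g in bin(n)[2:].split('0') if g)
-- ===== Notes on version B (the rewrite author's own statement) =====
-- stated objective: simpler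
-- what changed: Replaces A's explicit in_run state machine over the bits with partitioning bin(n)[2:] on '0' and counting the non-empty groups in one expression.
import Mathlib
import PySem

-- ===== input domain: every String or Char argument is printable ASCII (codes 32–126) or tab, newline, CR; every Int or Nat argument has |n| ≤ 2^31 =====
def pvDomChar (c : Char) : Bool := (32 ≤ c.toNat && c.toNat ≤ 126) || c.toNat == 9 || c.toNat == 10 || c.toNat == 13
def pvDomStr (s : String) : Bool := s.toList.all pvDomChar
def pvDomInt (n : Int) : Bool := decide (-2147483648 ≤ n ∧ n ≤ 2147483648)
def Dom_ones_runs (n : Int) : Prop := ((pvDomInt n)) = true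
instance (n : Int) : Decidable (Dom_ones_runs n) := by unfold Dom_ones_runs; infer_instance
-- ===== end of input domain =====

-- B replaces A's explicit in_run state machine by split-on-'0' group counting (objective: simpler).

-- shared helper: bin(n)[2:] as a char list ('b' + binary digits of |n| for n < 0); exact for all ints
def pvBits : Nat → List Char
  | 0 => []
  | m+1 => pvBits ((m+1)/2) ++ [if (m+1) % 2 = 1 then '1' else '0']
decreasing_by exact Nat.div_lt_self (Nat.succ_pos m) (by norm_num)

def pyBinTail (n : Int) : List Char :=
  if n < 0 then 'b' :: pvBits (-n).toNat
  else if n = 0 then ['0']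
  else pvBits n.toNat

-- ===== PORT A =====
def pvALoop : List Char → Int → Bool → Int
  | [], count, _ => count
  | bit :: rest, count, inr =>
    if bit = '1' ∧ ¬ inr = true then pvALoop rest (count + 1) true
    else if bit = '0' then pvALoop rest count false
    else pvALoop rest count inr

def ones_runs (n : Int) : Int := pvALoop (pyBinTail n) 0 false

-- ===== PORT B =====
-- b.split('0'): first group × remaining groups
def pvSplit0 : List Char → List Char × List (List Char)
  | [] => ([], [])
  | c :: rest =>
    let p := pvSplit0 rest
    if c = '0' then ([], p.1 :: p.2) else (c :: p.1, p.2)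

def ones_runs_alt (n : Int) : Int :=
  let p := pvSplit0 (pyBinTail n)
  (p.1 :: p.2).foldl (fun acc g => if g ≠ [] then acc + 1 else acc) 0

-- ===== PRECONDITION & SPEC =====
def Spec_ones_runs (n : Int) (out : Int) : Prop := out = ones_runs_alt n
instance (n : Int) (out : Int) : Decidable (Spec_ones_runs n out) := by unfold Spec_ones_runs; infer_instance

-- ===== CLAIM (what is proved, stated in full; the proofs are below) =====
def Claim_equal_ones_runs : Prop := ∀ (n : Int), Dom_ones_runs n → Spec_ones_runs n (ones_runs n)

-- ===== LEMMAS AND PROOFS =====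
def pvNe1 (g : List Char) : Int := if g = [] then 0 else 1

def pvNeCount : List (List Char) → Int
  | [] => 0
  | g :: gs => pvNe1 g + pvNeCount gs

theorem pv_foldl_ne (gs : List (List Char)) : ∀ acc : Int,
    gs.foldl (fun acc g => if g ≠ [] then acc + 1 else acc) acc = acc + pvNeCount gs := by
  induction gs with
  | nil => intro acc; simp [pvNeCount]
  | cons g gs ih =>
    intro acc
    simp only [List.foldl, pvNeCount, ih]
    by_cases h : g = [] <;> simp [h, pvNe1] <;> try ring

def pvAll01 (cs : List Char) : Prop := ∀ c ∈ cs, c = '1' ∨ c = '0'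

theorem pv_main (cs : List Char) (h : pvAll01 cs) : ∀ (c : Int) (r : Bool),
    pvALoop cs c r =
      c + (if r then pvNeCount (pvSplit0 cs).2
           else pvNe1 (pvSplit0 cs).1 + pvNeCount (pvSplit0 cs).2) := by
  induction cs with
  | nil => intro c r; cases r <;> simp [pvALoop, pvSplit0, pvNe1, pvNeCount]
  | cons b cs ih =>
    intro c r
    have hb : b = '1' ∨ b = '0' := h b (List.mem_cons_self ..)
    have hcs : pvAll01 cs := fun x hx => h x (List.mem_cons_of_mem _ hx)
    rcases hb with hb | hb <;> subst hb
    · cases r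
      · simp [pvALoop, pvSplit0, ih hcs, pvNe1]; ring
      · simp [pvALoop, pvSplit0, ih hcs]
    · cases r <;> simp [pvALoop, pvSplit0, ih hcs, pvNeCount, pvNe1]

theorem pv_bits_all01 : ∀ m : Nat, pvAll01 (pvBits m) := by
  intro m
  induction m using Nat.strong_induction_on with
  | _ m ih =>
    match m with
    | 0 => intro c hc; simp [pvBits] at hc
    | m+1 =>
      intro c hc
      rw [pvBits] at hc
      rcases List.mem_append.mp hc with h | h
      · exact ih ((m+1)/2) (Nat.div_lt_self (Nat.succ_pos m) (by norm_num)) c h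
      · simp at h; subst h; split <;> simp

theorem pv_bits_head : ∀ m : Nat, 0 < m → ∃ t, pvBits m = '1' :: t := by
  intro m
  induction m using Nat.strong_induction_on with
  | _ m ih =>
    match m with
    | 0 => intro h; omega
    | m+1 =>
      intro _
      rw [pvBits]
      by_cases h2 : (m+1)/2 = 0
      · have hm : m = 0 := by omega
        subst hm
        exact ⟨[], by norm_num [h2, pvBits]⟩
      · obtain ⟨t, ht⟩ := ih ((m+1)/2) (Nat.div_lt_self (Nat.succ_pos m) (by norm_num)) (Nat.pos_of_ne_zero h2)
        exact ⟨t ++ [if (m+1) % 2 = 1 then '1' else '0'], by rw [ht]; rfl⟩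

-- ===== VERDICT (by name: the statement is the Claim_ definition above) =====
theorem ones_runs_spec : Claim_equal_ones_runs := by
  intro n _
  unfold Spec_ones_runs ones_runs ones_runs_alt
  by_cases hn : n < 0
  · -- pyBinTail n = 'b' :: pvBits (-n).toNat, with (-n).toNat > 0
    have hpos : 0 < (-n).toNat := by omega
    obtain ⟨t, ht⟩ := pv_bits_head _ hpos
    have h01 : pvAll01 (pvBits (-n).toNat) := pv_bits_all01 _
    simp only [pyBinTail, if_pos hn]
    have hskip : pvALoop ('b' :: pvBits (-n).toNat) 0 false
        = pvALoop (pvBits (-n).toNat) 0 false := by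
      rw [pvALoop, if_neg (by decide), if_neg (by decide)]
    rw [hskip, pv_main _ h01 0 false, ht]
    show _ = List.foldl _ _ _
    simp only [pvSplit0]
    rw [pv_foldl_ne]
    simp [pvNe1, pvNeCount]
  · have h01 : pvAll01 (pyBinTail n) := by
      unfold pyBinTail
      rw [if_neg hn]
      split
      · intro c hc; simp at hc; simp [hc]
      · exact pv_bits_all01 _
    rw [pv_main _ h01 0 false, pv_foldl_ne]
    simp [pvNeCount]
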